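-- pv_equiv track=rewrite | github.com/hc-10digitech/10dt-python-intro | examples/dict_examples.py | prime_number_dict
-- ===== SOURCE A (Python) =====
-- def prime_number_dict(n: int) -> dict:
--     # Creates a dictionary with the numbers from 1 to n as the key
--     # and whether they are prime as the value
--     prime_numbers = {}
--
--     # Loop through the numbers from 1 to n
--     for num in range(1, n+1):
--         # Check if the number is prime
--         is_prime = True
--         if num > 1:
--             for i in range(2, num):
--                 if num % i == 0:
--                     is_prime = False
--                     break
--         else:
--             is_prime = False
--         # Add the number to the dictionary with whether it is prime as the value
--         prime_numbers[num] = is_prime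
--
--     return prime_numbers
-- ===== SOURCE B (Python) =====
-- def prime_number_dict(n: int) -> dict:
--     # Sieve of Eratosthenes: mark every multiple of every i once, instead of
--     # trial-dividing each number by all smaller numbers.
--     if n < 1:
--         return {}
--     sieve = [True] * (n + 1)
--     sieve[1] = False
--     for i in range(2, n + 1):
--         for j in range(2 * i, n + 1, i):
--             sieve[j] = False
--     return {k: sieve[k] for k in range(1, n + 1)}
-- ===== Notes on version B (the rewrite author's own statement) =====
-- stated objective: faster
-- what changed: Replaced per-number trial division by every smaller number with a sieve that marks the multiples of each i once and then reads primality off the table.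
import Mathlib
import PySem

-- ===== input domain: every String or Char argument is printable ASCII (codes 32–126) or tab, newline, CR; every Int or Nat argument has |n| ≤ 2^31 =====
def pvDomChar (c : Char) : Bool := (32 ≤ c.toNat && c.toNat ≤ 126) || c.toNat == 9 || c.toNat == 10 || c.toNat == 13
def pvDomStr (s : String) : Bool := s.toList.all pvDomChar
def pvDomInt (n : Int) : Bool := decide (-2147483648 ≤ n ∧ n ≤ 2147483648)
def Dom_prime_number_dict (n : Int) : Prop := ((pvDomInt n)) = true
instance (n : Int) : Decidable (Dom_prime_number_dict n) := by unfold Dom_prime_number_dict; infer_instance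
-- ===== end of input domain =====

-- B replaces A's per-number trial division with a Sieve of Eratosthenes (marks multiples once); objective: faster.

-- ===== PORT A =====
-- inner 'for i in range(2, num): if num % i == 0: is_prime = False; break'
def pvTrialLoop (num : Int) : List Int → Bool
  | [] => true
  | i :: rest => if PySem.Int.mod num i == 0 then false else pvTrialLoop num rest

def prime_number_dict (n : Int) : List (Int × Bool) :=
  ((PySem.List.pyRange 1 (n + 1) 1).foldl
      (fun d num =>
        let is_prime : Bool :=
          if num > 1 then pvTrialLoop num (PySem.List.pyRange 2 num 1) else false
        d.insert num is_prime)
      (PySem.Dict.empty : PySem.Dict Int Bool)).items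

-- ===== PORT B =====
-- sieve = [True]*(n+1); sieve[1] = False; for i in range(2, n+1): for j in range(2*i, n+1, i): sieve[j] = False
-- (every index written or read is provably in range, so List.set / List.getD are exact here)
def pvSieve (n : Int) : List Bool :=
  (PySem.List.pyRange 2 (n + 1) 1).foldl
    (fun s i => (PySem.List.pyRange (2 * i) (n + 1) i).foldl (fun s j => s.set j.toNat false) s)
    ((List.replicate (n + 1).toNat true).set 1 false)

def prime_number_dict_alt (n : Int) : List (Int × Bool) :=
  if n < 1 then []
  else
    ((PySem.List.pyRange 1 (n + 1) 1).foldl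
        (fun d k => d.insert k ((pvSieve n).getD k.toNat true))
        (PySem.Dict.empty : PySem.Dict Int Bool)).items

-- ===== PRECONDITION & SPEC =====
def Spec_prime_number_dict (n : Int) (out : List (Int × Bool)) : Prop := out = prime_number_dict_alt n
instance (n : Int) (out : List (Int × Bool)) : Decidable (Spec_prime_number_dict n out) := by unfold Spec_prime_number_dict; infer_instance

-- ===== CLAIM (what is proved, stated in full; the proofs are below) =====
def Claim_equal_prime_number_dict : Prop := ∀ (n : Int), Dom_prime_number_dict n → Spec_prime_number_dict n (prime_number_dict n)

-- ===== LEMMAS AND PROOFS =====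

-- A's break-loop returns true iff no element of the list divides num
theorem pvTrialLoop_eq_not_any (num : Int) (L : List Int) :
    pvTrialLoop num L = !L.any (fun i => PySem.Int.mod num i == 0) := by
  induction L with
  | nil => rfl
  | cons i rest ih =>
      simp only [pvTrialLoop, List.any_cons]
      by_cases h : PySem.Int.mod num i == 0 <;> simp [h, ih]

theorem pvSetFold_length (L : List Int) (s : List Bool) :
    (L.foldl (fun s j => s.set j.toNat false) s).length = s.length := by
  induction L generalizing s with
  | nil => rfl
  | cons j rest ih => simpa [List.foldl] using ih (s.set j.toNat false)

theorem pvSetFold_getD (L : List Int) (s : List Bool) (m : Nat) (hm : m < s.length) :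
    (L.foldl (fun s j => s.set j.toNat false) s).getD m true
      = (s.getD m true && !L.any (fun j => j.toNat == m)) := by
  induction L generalizing s with
  | nil => simp
  | cons j rest ih =>
      simp only [List.foldl_cons, List.any_cons]
      rw [ih _ (by rw [List.length_set]; exact hm)]
      by_cases h : j.toNat = m
      · subst h
        have hset : (s.set j.toNat false).getD j.toNat true = false := by
          simp only [List.getD, List.getElem?_set_self hm, Option.getD_some]
        rw [hset]; simp
      · have hset : (s.set j.toNat false).getD m true = s.getD m true := by
          simp only [List.getD, List.getElem?_set_ne h]
        have hb : (j.toNat == m) = false := by simp [h]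
        rw [hset, hb]; simp

theorem pvOuterFold_getD (I : List Int) (n : Int) (s : List Bool) (m : Nat) (hm : m < s.length) :
    (I.foldl
        (fun s i => (PySem.List.pyRange (2 * i) (n + 1) i).foldl (fun s j => s.set j.toNat false) s)
        s).getD m true
      = (s.getD m true
          && !I.any (fun i => (PySem.List.pyRange (2 * i) (n + 1) i).any (fun j => j.toNat == m))) := by
  induction I generalizing s with
  | nil => simp
  | cons i rest ih =>
      simp only [List.foldl_cons, List.any_cons]
      rw [ih _ (by rw [pvSetFold_length]; exact hm), pvSetFold_getD _ _ _ hm]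
      by_cases h : (PySem.List.pyRange (2 * i) (n + 1) i).any (fun j => j.toNat == m) <;> simp [h]

-- the sieve's marking condition is exactly A's "some i in [2, k) divides k" (for 2 ≤ k ≤ n)
theorem pvMarked_eq (n k : Int) (hk : 2 ≤ k) (hkn : k ≤ n) :
    ((PySem.List.pyRange 2 (n + 1) 1).any
        (fun i => (PySem.List.pyRange (2 * i) (n + 1) i).any (fun j => j.toNat == k.toNat)))
      = ((PySem.List.pyRange 2 k 1).any (fun i => PySem.Int.mod k i == 0)) := by
  rw [Bool.eq_iff_iff]
  simp only [List.any_eq_true, PySem.List.mem_pyRange_one, beq_iff_eq,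
    PySem.Int.mod_eq_zero_iff_dvd]
  constructor
  · rintro ⟨i, ⟨hi2, hin⟩, j, hj, hjk⟩
    rw [PySem.List.mem_pyRange_iff_of_pos (by omega : (0:Int) < i)] at hj
    obtain ⟨hj1, hj2, hdvd⟩ := hj
    have hjk' : j = k := by omega
    have hik : i ∣ k := by
      have h2 : i ∣ j := by simpa using Dvd.dvd.add hdvd (dvd_mul_left i 2)
      rwa [hjk'] at h2
    rw [hjk'] at hj1
    exact ⟨i, ⟨hi2, by omega⟩, hik⟩
  · rintro ⟨i, ⟨hi2, hik⟩, m, hm⟩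
    have hm2 : 2 ≤ m := by nlinarith
    have h2i : 2 * i ≤ k := by nlinarith
    refine ⟨i, ⟨hi2, by omega⟩, k, ?_, rfl⟩
    rw [PySem.List.mem_pyRange_iff_of_pos (by omega : (0:Int) < i)]
    exact ⟨h2i, by omega, Dvd.dvd.sub ⟨m, hm⟩ (dvd_mul_left i 2)⟩

-- per-key agreement of the two loop-body values, for 1 ≤ k ≤ n
theorem pvValue_eq (n k : Int) (h1 : 1 ≤ k) (hn : k ≤ n) :
    (if k > 1 then pvTrialLoop k (PySem.List.pyRange 2 k 1) else false)
      = (pvSieve n).getD k.toNat true := by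
  have hklen : k.toNat < ((List.replicate (n + 1).toNat true).set 1 false).length := by
    simp only [List.length_set, List.length_replicate]; omega
  unfold pvSieve
  rw [pvOuterFold_getD _ _ _ _ hklen]
  by_cases hk1 : k = 1
  · subst hk1
    have hl1 : (1:Nat) < (List.replicate (n + 1).toNat true).length := by
      simp only [List.length_replicate]; omega
    have hb : ((List.replicate (n + 1).toNat true).set 1 false).getD (1:Int).toNat true = false := by
      simp only [Int.toNat_one, List.getD, List.getElem?_set_self hl1, Option.getD_some]
    rw [hb]; simp
  · have hk2 : 2 ≤ k := by omega
    have hne : (1:Nat) ≠ k.toNat := by omega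
    have hkl : k.toNat < (n + 1).toNat := by omega
    have hb : ((List.replicate (n + 1).toNat true).set 1 false).getD k.toNat true = true := by
      simp only [List.getD, List.getElem?_set_ne hne, List.getElem?_replicate,
        if_pos hkl, Option.getD_some]
    rw [hb, if_pos (by omega : k > 1), pvTrialLoop_eq_not_any, Bool.true_and]
    congr 1
    exact (pvMarked_eq n k hk2 hn).symm

-- ===== VERDICT (by name: the statement is the Claim_ definition above) =====
theorem prime_number_dict_spec : Claim_equal_prime_number_dict := by
  intro n _
  unfold Spec_prime_number_dict prime_number_dict prime_number_dict_alt
  by_cases hn : n < 1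
  · rw [if_pos hn, PySem.List.pyRange_one_eq_nil (by omega : n + 1 ≤ 1)]
    rfl
  · rw [if_neg hn]
    congr 1
    apply PySem.List.foldl_congr_mem
    intro d k hk
    rw [PySem.List.mem_pyRange_one] at hk
    show d.insert k (if k > 1 then pvTrialLoop k (PySem.List.pyRange 2 k 1) else false)
        = d.insert k ((pvSieve n).getD k.toNat true)
    rw [pvValue_eq n k hk.1 (by omega)]
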